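-- pv_equiv track=rewrite | github.com/TheEleventhAvatar/AutoDocAgent | backend/form_filler.py | _find_matching_excel_column
-- ===== SOURCE A (Python) =====
-- from typing import Dict, Any, List
--
-- def _find_matching_excel_column(data_field: str, headers: List[str]) -> str:
--     """Find matching Excel column header for data field"""
--     data_field_lower = data_field.lower()
--
--     # Exact match
--     for header in headers:
--         if header == data_field_lower:
--             return header
--
--     # Partial match
--     for header in headers:
--         if data_field_lower in header or header in data_field_lower:
--             return header
--
--     # Synonym matching (same logic as PDF)
--     synonyms = {
--         "name": ["full_name", "applicant", "person"],
--         "email": ["email_address", "mail"],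
--         "phone": ["phone_number", "telephone", "mobile"],
--         "address": ["street_address", "residence"],
--         "date_of_birth": ["dob", "birth_date"],
--         "pan": ["pan_number", "pan_no"],
--         "aadhar": ["aadhaar", "uid"]
--     }
--
--     for canonical, synonym_list in synonyms.items():
--         if data_field_lower in [canonical] + synonym_list:
--             for header in headers:
--                 if header in [canonical] + synonym_list:
--                     return header
--
--     return None
-- ===== SOURCE B (Python) =====
-- def _find_matching_excel_column(data_field, headers):
--     """Find matching Excel column header for data field (single-pass best-rank)."""
--     data_field_lower = data_field.lower()
--
--     synonyms = {
--         "name": ["full_name", "applicant", "person"],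
--         "email": ["email_address", "mail"],
--         "phone": ["phone_number", "telephone", "mobile"],
--         "address": ["street_address", "residence"],
--         "date_of_birth": ["dob", "birth_date"],
--         "pan": ["pan_number", "pan_no"],
--         "aadhar": ["aadhaar", "uid"]
--     }
--
--     # the one synonym group containing the field (groups are disjoint), or []
--     group = []
--     for canonical, synonym_list in synonyms.items():
--         if data_field_lower == canonical or data_field_lower in synonym_list:
--             group = [canonical] + synonym_list
--             break
--
--     best_rank = 3
--     best = None
--     for header in headers:
--         if header == data_field_lower:
--             return header  # rank 0: nothing can beat an exact match
--         elif data_field_lower in header or header in data_field_lower: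
--             rank = 1
--         elif header in group:
--             rank = 2
--         else:
--             continue
--         if rank < best_rank:
--             best_rank = rank
--             best = header
--     return best
-- ===== Notes on version B (the rewrite author's own statement) =====
-- stated objective: alternative
-- what changed: A scans headers three times (exact, partial, then per-synonym-group); B locates the synonym group containing the field once and makes a single pass over headers tracking the best (lowest) match rank, returning early on an exact match.
import Mathlib
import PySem

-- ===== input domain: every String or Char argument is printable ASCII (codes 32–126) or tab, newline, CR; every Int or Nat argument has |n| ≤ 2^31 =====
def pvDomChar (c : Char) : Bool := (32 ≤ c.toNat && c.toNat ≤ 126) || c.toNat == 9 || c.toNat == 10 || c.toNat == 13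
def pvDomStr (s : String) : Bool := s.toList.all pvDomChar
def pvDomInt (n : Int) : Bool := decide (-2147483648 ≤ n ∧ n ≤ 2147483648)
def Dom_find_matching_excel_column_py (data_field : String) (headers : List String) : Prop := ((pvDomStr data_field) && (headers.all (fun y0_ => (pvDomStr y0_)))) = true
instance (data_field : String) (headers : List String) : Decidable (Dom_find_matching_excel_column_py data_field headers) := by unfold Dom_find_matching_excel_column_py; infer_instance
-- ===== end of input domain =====

-- B replaces A's three sequential scans of `headers` by one pass tracking the best
-- (lowest) match rank, with the synonym group located once up front (objective: alternative).

-- the synonyms dict (same constant in both programs)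
def pvSynonyms : List (String × List String) :=
  [("name", ["full_name", "applicant", "person"]),
   ("email", ["email_address", "mail"]),
   ("phone", ["phone_number", "telephone", "mobile"]),
   ("address", ["street_address", "residence"]),
   ("date_of_birth", ["dob", "birth_date"]),
   ("pan", ["pan_number", "pan_no"]),
   ("aadhar", ["aadhaar", "uid"])]

-- ===== PORT A =====
-- A's third stage: scan the synonym groups; for the group containing f, scan headers
def pvASyn (f : String) (headers : List String) : List (String × List String) → Option String
  | [] => none
  | (c, syns) :: rest =>
    if (c :: syns).contains f then
      match headers.find? (fun h => (c :: syns).contains h) with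
      | some h => some h
      | none => pvASyn f headers rest
    else pvASyn f headers rest

def find_matching_excel_column_py (data_field : String) (headers : List String) : Option String :=
  let f := PySem.Str.lower data_field
  match headers.find? (fun h => h == f) with
  | some h => some h
  | none =>
    match headers.find? (fun h => PySem.Str.isIn f h || PySem.Str.isIn h f) with
    | some h => some h
    | none => pvASyn f headers pvSynonyms

-- ===== PORT B =====
-- the synonym group containing f ([canonical] + list), or [] if none
def pvGroupOf (f : String) : List (String × List String) → List String
  | [] => []
  | (c, syns) :: rest =>
    if f == c || syns.contains f then c :: syns else pvGroupOf f rest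

-- single pass over headers, keeping the best (lowest) rank and its first header
def pvBLoop (f : String) (g : List String) :
    List String → Nat → Option String → Option String
  | [], _, best => best
  | h :: rest, bestRank, best =>
    if h == f then some h  -- rank 0: nothing can beat an exact match
    else if PySem.Str.isIn f h || PySem.Str.isIn h f then
      if 1 < bestRank then pvBLoop f g rest 1 (some h) else pvBLoop f g rest bestRank best
    else if g.contains h then
      if 2 < bestRank then pvBLoop f g rest 2 (some h) else pvBLoop f g rest bestRank best
    else pvBLoop f g rest bestRank best

def find_matching_excel_column_py_alt (data_field : String) (headers : List String) : Option String :=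
  let f := PySem.Str.lower data_field
  pvBLoop f (pvGroupOf f pvSynonyms) headers 3 none

-- ===== PRECONDITION & SPEC =====
def Spec_find_matching_excel_column_py (data_field : String) (headers : List String) (out : Option String) : Prop := out = find_matching_excel_column_py_alt data_field headers
instance (data_field : String) (headers : List String) (out : Option String) : Decidable (Spec_find_matching_excel_column_py data_field headers out) := by unfold Spec_find_matching_excel_column_py; infer_instance

-- ===== CLAIM (what is proved, stated in full; the proofs are below) =====
def Claim_equal_find_matching_excel_column_py : Prop := ∀ (data_field : String) (headers : List String), Dom_find_matching_excel_column_py data_field headers → Spec_find_matching_excel_column_py data_field headers (find_matching_excel_column_py data_field headers)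

-- ===== LEMMAS AND PROOFS =====

-- characterisation of B's loop in terms of the three find?'s A performs
theorem pvBLoop_eq (f : String) (g : List String) :
    ∀ (hs : List String) (r : Nat) (best : Option String),
    pvBLoop f g hs r best =
      match hs.find? (fun h => h == f) with
      | some h => some h
      | none =>
        if r ≤ 1 then best else
        match hs.find? (fun h => PySem.Str.isIn f h || PySem.Str.isIn h f) with
        | some h => some h
        | none =>
          if r ≤ 2 then best else
          match hs.find? (fun h => g.contains h) with
          | some h => some h
          | none => best := by
  intro hs
  induction hs with
  | nil => intro r best; simp [pvBLoop]
  | cons h rest ih =>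
    intro r best
    by_cases h0 : (h == f) = true
    · simp [pvBLoop, h0]
    · by_cases h1 : (PySem.Chars.isIn f.toList h.toList || PySem.Chars.isIn h.toList f.toList) = true
      · by_cases hr : 1 < r
        · have hr1 : ¬ r ≤ 1 := by omega
          simp only [pvBLoop]
          rw [if_neg (by simp [h0]), if_pos (by simpa using h1), if_pos hr, ih]
          simp [h0, h1, hr1]
        · have hr1 : r ≤ 1 := by omega
          simp only [pvBLoop]
          rw [if_neg (by simp [h0]), if_pos (by simpa using h1), if_neg hr, ih]
          simp [h0, hr1]
      · by_cases h2 : h ∈ g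
        · by_cases hr : 2 < r
          · have hr1 : ¬ r ≤ 1 := by omega
            have hr2 : ¬ r ≤ 2 := by omega
            simp only [pvBLoop]
            rw [if_neg (by simp [h0]), if_neg (by simpa using h1), if_pos (by simpa using h2), if_pos hr, ih]
            simp [h0, h1, h2, hr1, hr2]
          · have hr2 : r ≤ 2 := by omega
            simp only [pvBLoop]
            rw [if_neg (by simp [h0]), if_neg (by simpa using h1), if_pos (by simpa using h2), if_neg hr, ih]
            by_cases hr1 : r ≤ 1 <;>
              simp [h0, h1, hr1, hr2]
        · simp only [pvBLoop]
          rw [if_neg (by simp [h0]), if_neg (by simpa using h1), if_neg (by simpa using h2), ih]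
          simp [h0, h1, h2]

-- if f is in no group of syns, A's synonym stage returns none
theorem pvASyn_none (f : String) (hs : List String) :
    ∀ (syns : List (String × List String)),
    (∀ p ∈ syns, (p.1 :: p.2).contains f = false) →
    pvASyn f hs syns = none := by
  intro syns
  induction syns with
  | nil => intro _; simp [pvASyn]
  | cons p rest ih =>
    intro hall
    obtain ⟨c, s⟩ := p
    have hc := hall (c, s) (by simp)
    simp only [pvASyn, hc, Bool.false_eq_true, if_false]
    exact ih (fun q hq => hall q (by simp [hq]))

-- with pairwise-disjoint groups, A's synonym stage is one find? over f's group
theorem pvASyn_eq (f : String) (hs : List String) :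
    ∀ (syns : List (String × List String)),
    List.Pairwise (fun p q => ∀ x, (p.1 :: p.2).contains x = true → (q.1 :: q.2).contains x = false) syns →
    pvASyn f hs syns = hs.find? (fun h => (pvGroupOf f syns).contains h) := by
  intro syns
  induction syns with
  | nil =>
    intro _
    simp only [pvASyn, pvGroupOf]
    rw [eq_comm, List.find?_eq_none]
    intro x _
    simp
  | cons p rest ih =>
    intro hpw
    obtain ⟨c, s⟩ := p
    rw [List.pairwise_cons] at hpw
    by_cases hin : ((c :: s).contains f) = true
    · have hin' : (f == c || s.contains f) = true := by
        rw [List.contains_cons] at hin; exact hin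
      have hgrp : pvGroupOf f ((c, s) :: rest) = c :: s := by
        simp only [pvGroupOf]; rw [if_pos hin']
      have hnone : pvASyn f hs rest = none :=
        pvASyn_none f hs rest (fun q hq => hpw.1 q hq f hin)
      rw [hgrp]
      simp only [pvASyn, hin, if_true, hnone]
      cases hf : hs.find? (fun h => (c :: s).contains h) <;> simp
    · have hin' : ¬ (f == c || s.contains f) = true := by
        rw [List.contains_cons] at hin; exact hin
      have hgrp : pvGroupOf f ((c, s) :: rest) = pvGroupOf f rest := by
        simp only [pvGroupOf]; rw [if_neg hin']
      simp only [pvASyn, hin, Bool.false_eq_true, if_false]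
      rw [hgrp, ih hpw.2]

theorem pvSynonyms_disjoint :
    List.Pairwise (fun p q => ∀ x, (p.1 :: p.2).contains x = true → (q.1 :: q.2).contains x = false) pvSynonyms := by
  have hdec : List.Pairwise (fun p q => ∀ x ∈ p.1 :: p.2, x ∉ q.1 :: q.2) pvSynonyms := by
    decide
  refine hdec.imp ?_
  intro p q hpq x hx
  have hx' : x ∈ p.1 :: p.2 := by simpa using hx
  simpa using hpq x hx'

-- ===== VERDICT (by name: the statement is the Claim_ definition above) =====
theorem find_matching_excel_column_py_spec : Claim_equal_find_matching_excel_column_py := by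
  intro data_field headers _
  unfold Spec_find_matching_excel_column_py
  unfold find_matching_excel_column_py find_matching_excel_column_py_alt
  dsimp only
  rw [pvBLoop_eq, pvASyn_eq _ _ _ pvSynonyms_disjoint]
  cases h1 : headers.find? (fun h => h == PySem.Str.lower data_field) <;>
  cases h2 : headers.find? (fun h => PySem.Str.isIn (PySem.Str.lower data_field) h || PySem.Str.isIn h (PySem.Str.lower data_field)) <;>
  cases h3 : headers.find? (fun h => (pvGroupOf (PySem.Str.lower data_field) pvSynonyms).contains h) <;>
  simp
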